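-- pv_equiv track=rewrite | github.com/mnuman/advent-of-code | 2024/solutions/day20.py | offsets
-- ===== SOURCE A (Python) =====
-- def offsets(max_dist=20):
--     """Generate a set of offsets for points to consider, within a maximum manhattan distance"""
--     dist_gen = (
--         (r, c)
--         for r in range(0, max_dist + 1)
--         for c in range(0, max_dist + 1)
--         if 0 < (r + c) <= max_dist
--     )
--     return {
--         (s1 * r, s2 * c)
--         for r, c in dist_gen
--         for s1, s2 in [(1, 1), (-1, 1), (1, -1), (-1, -1)]
--     }
-- ===== SOURCE B (Python) =====
-- def offsets(max_dist=20):
--     """Generate a set of offsets for points to consider, within a maximum manhattan distance"""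
--     def signed(n):
--         # magnitudes in increasing order, each followed by its negation
--         s = []
--         for k in range(1, n + 1):
--             s += [k, -k]
--         return s
--     out = [(0, c) for c in signed(max_dist)]
--     for r in range(1, max_dist + 1):
--         for c in [0] + signed(max_dist - r):
--             out += [(r, c), (-r, c)]
--     return set(out)
-- ===== Notes on version B (the rewrite author's own statement) =====
-- stated objective: alternative
-- what changed: Replaces A's full-quadrant generation + distance filter + four-way sign reflection + set deduplication with a direct mirror-free construction: a signed() helper yields the column magnitudes in increasing order, each immediately followed by its negation, with exact bounds per row, and each positive row is emitted together with its mirror row, so every offset is produced exactly once with no filter and no dedup.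
import Mathlib
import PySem

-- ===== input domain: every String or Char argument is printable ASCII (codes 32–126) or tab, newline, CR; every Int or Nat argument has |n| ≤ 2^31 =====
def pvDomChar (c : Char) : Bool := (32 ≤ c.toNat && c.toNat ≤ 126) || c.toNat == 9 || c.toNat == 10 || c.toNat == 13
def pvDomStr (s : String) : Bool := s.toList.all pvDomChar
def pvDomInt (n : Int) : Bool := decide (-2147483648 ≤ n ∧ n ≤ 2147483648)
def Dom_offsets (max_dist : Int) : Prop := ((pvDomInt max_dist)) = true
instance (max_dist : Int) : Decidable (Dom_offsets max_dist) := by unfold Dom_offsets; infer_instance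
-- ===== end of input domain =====

-- B replaces A's quadrant generation + distance filter + four-way sign reflection + set dedup
-- by a direct duplicate-free construction: an interleaved signed column sequence with exact
-- per-row bounds, emitting each row together with its mirror row; same set, alternative algorithm.

-- ===== PORT A =====
def offsets (max_dist : Int) : List (Int × Int) :=
  let dist_gen : List (Int × Int) :=
    (PySem.List.pyRange 0 (max_dist + 1) 1).flatMap (fun r =>
      (PySem.List.pyRange 0 (max_dist + 1) 1).flatMap (fun c =>
        if 0 < r + c ∧ r + c ≤ max_dist then [(r, c)] else []))
  PySem.Set.ofList (dist_gen.flatMap (fun rc =>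
    ([((1 : Int), (1 : Int)), (-1, 1), (1, -1), (-1, -1)]).map
      (fun s => (s.1 * rc.1, s.2 * rc.2))))

-- ===== PORT B =====
-- helper signed(n): magnitudes in increasing order, each followed by its negation ('s += [k, -k]' in a loop)
def pvSigned (n : Int) : List Int :=
  (PySem.List.pyRange 1 (n + 1) 1).foldl (fun s k => s ++ [k, -k]) []

def offsets_alt (max_dist : Int) : List (Int × Int) :=
  let out : List (Int × Int) := (pvSigned max_dist).map (fun c => ((0 : Int), c))
  let out := (PySem.List.pyRange 1 (max_dist + 1) 1).foldl (fun out r =>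
      ([0] ++ pvSigned (max_dist - r)).foldl (fun out c =>
        out ++ [(r, c), (-r, c)]) out) out
  PySem.Set.ofList out

-- ===== PRECONDITION & SPEC =====
def Spec_offsets (max_dist : Int) (out : List (Int × Int)) : Prop := out = offsets_alt max_dist
instance (max_dist : Int) (out : List (Int × Int)) : Decidable (Spec_offsets max_dist out) := by unfold Spec_offsets; infer_instance

-- ===== CLAIM (what is proved, stated in full; the proofs are below) =====
def Claim_equal_offsets : Prop := ∀ (max_dist : Int), Dom_offsets max_dist → Spec_offsets max_dist (offsets max_dist)

-- ===== LEMMAS AND PROOFS =====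

-- proof-only helper definitions (names of pieces of the two ports)
def pvR (m : Int) : List Int := PySem.List.pyRange 0 (m + 1) 1
def pvR2 (m r : Int) : List Int := PySem.List.pyRange (if r = 0 then 1 else 0) (m - r + 1) 1
def pvFour (rc : Int × Int) : List (Int × Int) :=
  ([((1 : Int), (1 : Int)), (-1, 1), (1, -1), (-1, -1)]).map (fun s => (s.1 * rc.1, s.2 * rc.2))
def pvCell (r c : Int) : List (Int × Int) :=
  (if c = 0 then [(1 : Int)] else [1, -1]).flatMap (fun s2 =>
    (if r = 0 then [(1 : Int)] else [1, -1]).map (fun s1 => (s1 * r, s2 * c)))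
def pvOut (m : Int) : List (Int × Int) :=
  (pvR m).flatMap (fun r => (pvR2 m r).flatMap (fun c => pvCell r c))
def pvE (m : Int) : List (Int × Int) :=
  ((pvR m).flatMap (fun r => (pvR m).flatMap (fun c =>
    if 0 < r + c ∧ r + c ≤ m then [(r, c)] else []))).flatMap pvFour

theorem pv_flatMap_congr {α β : Type} (l : List α) (f g : α → List β)
    (h : ∀ x ∈ l, f x = g x) : l.flatMap f = l.flatMap g := by
  induction l with
  | nil => rfl
  | cons a l ih =>
    simp only [List.flatMap_cons]
    rw [h a (by simp), ih (fun x hx => h x (by simp [hx]))]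

theorem pv_flatMap_ite_singleton {α β : Type} (l : List α) (p : α → Prop) [DecidablePred p]
    (f : α → β) :
    (l.flatMap fun x => if p x then [f x] else []) = (l.filter fun x => decide (p x)).map f := by
  induction l with
  | nil => rfl
  | cons a l ih => by_cases h : p a <;> simp [h, ih]

theorem pv_flatMap_map_flatMap {α β γ : Type} (l : List α) (f : α → β) (g : β → List γ) :
    (l.map f).flatMap g = l.flatMap (fun x => g (f x)) := by
  induction l with
  | nil => rfl
  | cons a l ih => simp [ih]

theorem pv_flatMap_assoc {α β γ : Type} (l : List α) (f : α → List β) (g : β → List γ) :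
    (l.flatMap f).flatMap g = l.flatMap (fun x => (f x).flatMap g) := by
  induction l with
  | nil => rfl
  | cons a l ih => simp [ih]

theorem pv_ofList_append_disjoint {α : Type} [BEq α] [LawfulBEq α] (xs ys : List α)
    (h : ∀ y ∈ ys, y ∉ xs) :
    PySem.Set.ofList (xs ++ ys) = PySem.Set.ofList xs ++ PySem.Set.ofList ys := by
  rw [PySem.Set.ofList_append, PySem.Set.update_eq_append_filter]
  congr 1
  apply List.filter_eq_self.mpr
  intro a ha
  have : a ∈ ys := (PySem.Set.mem_ofList _ _).mp ha
  simp [PySem.Set.contains_eq_listContains]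
  exact fun hmem => h a this hmem

theorem pv_ofList_flatMap {α β : Type} [BEq α] [LawfulBEq α] (l : List β) (f : β → List α)
    (key : α → β) (hk : ∀ b ∈ l, ∀ a ∈ f b, key a = b) (hl : l.Nodup) :
    PySem.Set.ofList (l.flatMap f) = l.flatMap (fun b => PySem.Set.ofList (f b)) := by
  induction l with
  | nil => rfl
  | cons b l ih =>
    simp only [List.flatMap_cons]
    rw [pv_ofList_append_disjoint]
    · rw [ih (fun b' hb' a ha => hk b' (by simp [hb']) a ha) (List.Nodup.of_cons hl)]
    · intro y hy hyb
      obtain ⟨b', hb', hy'⟩ := List.mem_flatMap.mp hy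
      have h1 : key y = b := hk b (by simp) y hyb
      have h2 : key y = b' := hk b' (by simp [hb']) y hy'
      exact (List.nodup_cons.mp hl).1 (h1 ▸ h2 ▸ hb')

theorem pv_filter_range (m r : Int) (h0 : 0 ≤ r) (_h1 : r ≤ m) :
    ((pvR m).filter fun c => decide (0 < r + c ∧ r + c ≤ m)) = pvR2 m r := by
  have hn1 : ((pvR m).filter fun c => decide (0 < r + c ∧ r + c ≤ m)).Nodup :=
    List.Nodup.filter _ (PySem.List.nodup_pyRange_one 0 (m + 1))
  have hn2 : (pvR2 m r).Nodup := PySem.List.nodup_pyRange_one _ (m - r + 1)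
  refine List.Perm.eq_of_pairwise (fun a b _ _ hab hba => by omega)
    (List.Pairwise.filter _ (PySem.List.pairwise_lt_pyRange_one 0 (m + 1)))
    (PySem.List.pairwise_lt_pyRange_one _ (m - r + 1))
    ((List.perm_ext_iff_of_nodup hn1 hn2).mpr ?_)
  intro c
  by_cases hr : r = 0 <;>
    simp [pvR, pvR2, hr, List.mem_filter, PySem.List.mem_pyRange_one] <;> omega

theorem pv_cell_eq (r c : Int) (hr : 0 ≤ r) (hc : 0 ≤ c) (hne : ¬(r = 0 ∧ c = 0)) :
    PySem.Set.ofList (pvFour (r, c)) = pvCell r c := by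
  by_cases h1 : r = 0 <;> by_cases h2 : c = 0 <;>
    simp_all [pvFour, pvCell, PySem.Set.ofList, PySem.Set.add, Prod.ext_iff] <;>
    split_ifs <;> simp_all <;> omega

theorem pv_A_eq : ∀ m : Int, offsets m = pvOut m := by
  intro m
  have hE : offsets m = PySem.Set.ofList (pvE m) := rfl
  rw [hE]
  have hgen : pvE m = (pvR m).flatMap (fun r => (pvR2 m r).flatMap (fun c => pvFour (r, c))) := by
    unfold pvE
    rw [pv_flatMap_assoc]
    apply pv_flatMap_congr
    intro r hrmem
    have hr : 0 ≤ r ∧ r < m + 1 := by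
      simpa [pvR, PySem.List.mem_pyRange_one] using hrmem
    rw [pv_flatMap_ite_singleton (pvR m) (fun c => 0 < r + c ∧ r + c ≤ m) (fun c => (r, c)),
        pv_filter_range m r hr.1 (by omega), pv_flatMap_map_flatMap]
  rw [hgen]
  rw [pv_ofList_flatMap _ _ (fun a => |a.1|)]
  · apply pv_flatMap_congr
    intro r hrmem
    have hr : 0 ≤ r := by
      have := (by simpa [pvR, PySem.List.mem_pyRange_one] using hrmem : 0 ≤ r ∧ r < m + 1)
      exact this.1
    rw [pv_ofList_flatMap _ _ (fun a => |a.2|)]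
    · exact pv_flatMap_congr _ _ _ (fun c hcmem => by
        have hc : (if r = 0 then 1 else 0) ≤ c := by
          have := (by simpa [pvR2, PySem.List.mem_pyRange_one] using hcmem :
            (if r = 0 then (1:Int) else 0) ≤ c ∧ c < m - r + 1)
          exact this.1
        apply pv_cell_eq r c hr
        · split_ifs at hc <;> omega
        · rintro ⟨h1, h2⟩; rw [h1] at hc; simp at hc; omega)
    · intro c hcmem a ha
      have hc : 0 ≤ c := by
        have := (by simpa [pvR2, PySem.List.mem_pyRange_one] using hcmem :
          (if r = 0 then (1:Int) else 0) ≤ c ∧ c < m - r + 1)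
        have := this.1; split_ifs at this <;> omega
      simp only [pvFour, List.mem_map] at ha
      obtain ⟨s, hs, rfl⟩ := ha
      fin_cases hs <;> simp [abs_of_nonneg hc]
    · simpa [pvR2] using PySem.List.nodup_pyRange_one _ (m - r + 1)
  · intro r hrmem a ha
    have hr : 0 ≤ r := by
      have := (by simpa [pvR, PySem.List.mem_pyRange_one] using hrmem : 0 ≤ r ∧ r < m + 1)
      exact this.1
    obtain ⟨c, _, ha'⟩ := List.mem_flatMap.mp ha
    simp only [pvFour, List.mem_map] at ha'
    obtain ⟨s, hs, rfl⟩ := ha'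
    fin_cases hs <;> simp [abs_of_nonneg hr]
  · simpa [pvR] using PySem.List.nodup_pyRange_one 0 (m + 1)

-- signed(n) as a flatMap
theorem pv_signed_eq (n : Int) :
    pvSigned n = (PySem.List.pyRange 1 (n + 1) 1).flatMap (fun k => [k, -k]) := by
  unfold pvSigned
  rw [PySem.List.foldl_append_eq_flatMap]
  simp

-- B's generated list IS pvOut m
theorem pv_B_list_eq (m : Int) :
    (pvSigned m).map (fun c => ((0 : Int), c)) ++
      (PySem.List.pyRange 1 (m + 1) 1).flatMap (fun r =>
        ([0] ++ pvSigned (m - r)).flatMap (fun c => [(r, c), (-r, c)])) = pvOut m := by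
  unfold pvOut
  by_cases hm : 0 < m + 1
  · rw [pvR, PySem.List.pyRange_one_cons (by omega : (0 : Int) < m + 1)]
    rw [List.flatMap_cons]
    congr 1
    · -- row 0
      have : pvR2 m 0 = PySem.List.pyRange 1 (m + 1) 1 := by
        simp [pvR2]
      rw [this, pv_signed_eq, List.map_flatMap]
      apply pv_flatMap_congr
      intro k hk
      have hk1 : 1 ≤ k := (PySem.List.mem_pyRange_one.mp hk).1
      simp only [pvCell]
      rw [if_neg (by omega : ¬ k = 0)]
      simp
    · -- rows 1..m, each with its mirror
      apply pv_flatMap_congr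
      intro r hr
      have hr1 : 1 ≤ r ∧ r < m + 1 := PySem.List.mem_pyRange_one.mp hr
      rw [pv_signed_eq]
      have hR2 : pvR2 m r = 0 :: PySem.List.pyRange 1 (m - r + 1) 1 := by
        rw [pvR2, if_neg (by omega : ¬ r = 0)]
        by_cases hb : (0 : Int) < m - r + 1
        · exact PySem.List.pyRange_one_cons hb
        · omega
      rw [hR2, List.flatMap_append, List.flatMap_cons]
      congr 1
      · simp only [pvCell]
        rw [if_neg (by omega : ¬ r = 0)]
        simp
      · rw [pv_flatMap_assoc]
        apply pv_flatMap_congr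
        intro k hk
        have hk1 : 1 ≤ k := (PySem.List.mem_pyRange_one.mp hk).1
        simp only [pvCell]
        rw [if_neg (by omega : ¬ r = 0), if_neg (by omega : ¬ k = 0)]
        simp
  · have h0 : PySem.List.pyRange 1 (m + 1) 1 = [] := by
      simp [List.eq_nil_iff_forall_not_mem, PySem.List.mem_pyRange_one]; omega
    have h1 : pvR m = [] := by
      simp [pvR, List.eq_nil_iff_forall_not_mem, PySem.List.mem_pyRange_one]; omega
    simp [h0, h1, pv_signed_eq]

theorem pv_B_eq : ∀ m : Int, offsets_alt m = PySem.Set.ofList (pvOut m) := by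
  intro m
  show PySem.Set.ofList _ = _
  congr 1
  simp only [PySem.List.foldl_append_eq_flatMap]
  exact pv_B_list_eq m

-- ===== VERDICT (by name: the statement is the Claim_ definition above) =====
theorem offsets_spec : Claim_equal_offsets := by
  intro m _
  unfold Spec_offsets
  rw [pv_B_eq m, ← pv_A_eq m, pv_A_eq m]
  have h : pvOut m = PySem.Set.ofList (pvE m) := by rw [← pv_A_eq m]; rfl
  rw [h, PySem.Set.ofList_ofList]
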